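-- pv_equiv track=rewrite | github.com/ColinAnthony/NGS_processing_pipeline | align_all_env_samples.py | patch_and_repair
-- ===== SOURCE A (Python) =====
-- import collections
--
-- def patch_and_repair(aln_seqs, loop_dict):
--     '''
--     :param aln_seqs: (dict) dictionary of aligned conserverved regions
--     :param loop_dict: (dict) dictionary of extracted loop sequences
--     :return: (dict) dictionary of lookup indexes and merged conserved and variable regions
--     '''
--     master_universe = collections.defaultdict(list)
--     for cons_region, al_dict in aln_seqs.items():
--         for s_idx, sequence in al_dict.items():
--             master_universe[s_idx].append([cons_region, sequence])
--     for look_up_val, lst in master_universe.items():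
--         full_seq = []
--         item = sorted(lst)
--         loop_list = loop_dict[look_up_val]
--         for i, ls in enumerate(item):
--             full_seq.append(ls[1])
--             if i < len(loop_list):
--                 full_seq.append(loop_list[i])
--             else:
--                 continue
--         full_seq = "".join(full_seq)
--         master_universe[look_up_val] = full_seq
--     return master_universe
-- ===== SOURCE B (Python) =====
-- import collections
--
-- def patch_and_repair(aln_seqs, loop_dict):
--     # One global sort of the region names replaces A's per-sample sort of
--     # [region, sequence] pair lists; samples are collected in first-appearance
--     # order, and each merged sequence is built by zip-interleaving.
--     order = sorted(aln_seqs)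
--     samples = []
--     seen = set()
--     for al_dict in aln_seqs.values():
--         for s_idx in al_dict:
--             if s_idx not in seen:
--                 seen.add(s_idx)
--                 samples.append(s_idx)
--     result = collections.defaultdict(list)
--     for s_idx in samples:
--         conserved = [aln_seqs[r][s_idx] for r in order if s_idx in aln_seqs[r]]
--         loop_list = loop_dict[s_idx]
--         merged = [x for pair in zip(conserved, loop_list) for x in pair] + conserved[len(loop_list):]
--         result[s_idx] = "".join(merged)
--     return result
-- ===== Notes on version B (the rewrite author's own statement) =====
-- stated objective: alternative
-- what changed: Instead of grouping (region, sequence) pairs per sample and sorting each sample's pair list, B sorts the region names once globally, collects sample keys in first-appearance order, and builds each merged sequence by filtering the sorted region list and zip-interleaving with the loop list.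
import Mathlib
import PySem

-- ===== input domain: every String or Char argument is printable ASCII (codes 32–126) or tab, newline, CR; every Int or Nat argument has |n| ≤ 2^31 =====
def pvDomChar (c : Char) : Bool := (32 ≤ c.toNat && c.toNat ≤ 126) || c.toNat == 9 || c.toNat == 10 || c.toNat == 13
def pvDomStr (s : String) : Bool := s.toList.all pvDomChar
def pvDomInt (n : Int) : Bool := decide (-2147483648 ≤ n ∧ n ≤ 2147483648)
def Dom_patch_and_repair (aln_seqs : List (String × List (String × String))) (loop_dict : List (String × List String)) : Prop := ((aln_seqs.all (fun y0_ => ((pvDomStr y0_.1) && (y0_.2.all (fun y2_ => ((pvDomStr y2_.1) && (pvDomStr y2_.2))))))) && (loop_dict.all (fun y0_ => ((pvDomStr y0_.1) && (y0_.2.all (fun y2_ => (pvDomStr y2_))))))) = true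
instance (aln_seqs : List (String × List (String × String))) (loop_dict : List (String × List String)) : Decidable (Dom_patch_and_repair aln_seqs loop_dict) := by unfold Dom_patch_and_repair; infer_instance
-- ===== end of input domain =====

-- B replaces A's group-then-sort-each-sample pass by one global sort of the region
-- names plus a filtered scan per sample (objective: alternative decomposition).

-- ===== PORT A =====
-- Literal port of A: group (region, sequence) pairs per sample into a dict of lists,
-- then for each entry sort the pairs (Python tuple order = sorted2 on fst, snd),
-- interleave with loop_dict[s] and join.  Python's `master_universe[k] = full_seq`
-- retypes each value list → str in place, each key exactly once and keys are unique
-- by construction, so the returned dict is ported as the items list built in order.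
-- `loop_dict[look_up_val]` raises KeyError when absent (getD here; excluded by Pre_);
-- `loop_list[i]` is guarded by i < len so List.getD is exact.
def patch_and_repair (aln_seqs : List (String × List (String × String))) (loop_dict : List (String × List String)) : List (String × String) :=
  let master := aln_seqs.foldl
    (fun d p => p.2.foldl (fun d q => d.modify q.1 [] (fun xs => xs ++ [(p.1, q.2)])) d)
    PySem.Dict.empty
  master.items.foldl (fun out kl =>
    let item := PySem.List.sorted2 kl.2 Prod.fst Prod.snd
    let loop_list := (PySem.Dict.mk loop_dict).getD kl.1 []
    let full_seq := (item.foldl (fun st ls =>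
        ((st.1 ++ [ls.2]) ++ (if st.2 < loop_list.length then [loop_list.getD st.2 ""] else []),
         st.2 + 1)) (([] : List String), 0)).1
    out ++ [(kl.1, PySem.Str.join "" full_seq)]) []

-- ===== PORT B =====
-- Literal port of Source B: `order = sorted(aln_seqs)`; samples in first-appearance order
-- (the seen-set loop is PySem.Set.ofList of the flattened key lists); per sample the
-- comprehension `[aln_seqs[r][s] for r in order if s in aln_seqs[r]]` is the filterMap
-- (membership test + lookup = the option bind); merged = zip-interleave ++ tail slice
-- (`conserved[n:]` for 0 ≤ n is List.drop); `loop_dict[s]` raises when absent (getD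
-- here; excluded by Pre_).
def patch_and_repair_alt (aln_seqs : List (String × List (String × String))) (loop_dict : List (String × List String)) : List (String × String) :=
  let order := PySem.List.sorted (aln_seqs.map Prod.fst) (fun x => x)
  let samples := PySem.Set.ofList (aln_seqs.flatMap (fun p => p.2.map Prod.fst))
  samples.map (fun s =>
    let conserved := order.filterMap (fun r =>
      ((PySem.Dict.mk aln_seqs).get? r).bind (fun al => (PySem.Dict.mk al).get? s))
    let loop_list := (PySem.Dict.mk loop_dict).getD s []
    let merged := (conserved.zip loop_list).flatMap (fun p => [p.1, p.2]) ++
      conserved.drop loop_list.length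
    (s, PySem.Str.join "" merged))

-- ===== PRECONDITION & SPEC =====
-- Pre_ excludes (a) inputs where some sample index is missing from loop_dict — there
-- Python A (and B) raise KeyError — and (b) association lists with duplicate outer or
-- inner keys, which cannot arise from Python dicts at all.
def Pre_patch_and_repair (aln_seqs : List (String × List (String × String))) (loop_dict : List (String × List String)) : Prop :=
  (aln_seqs.map Prod.fst).Nodup ∧
  (∀ p ∈ aln_seqs, (p.2.map Prod.fst).Nodup) ∧
  (∀ p ∈ aln_seqs, ∀ q ∈ p.2, q.1 ∈ loop_dict.map Prod.fst)
instance (aln_seqs : List (String × List (String × String))) (loop_dict : List (String × List String)) : Decidable (Pre_patch_and_repair aln_seqs loop_dict) := by unfold Pre_patch_and_repair; infer_instance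

def pvWitness_patch_and_repair : (List (String × List (String × String))) × (List (String × List String)) :=
  ([("C2", [("s1", "AA"), ("s2", "CC")]), ("C1", [("s1", "GG")])],
   [("s1", ["tt"]), ("s2", [])])

def Spec_patch_and_repair (aln_seqs : List (String × List (String × String))) (loop_dict : List (String × List String)) (out : List (String × String)) : Prop := out = patch_and_repair_alt aln_seqs loop_dict
instance (aln_seqs : List (String × List (String × String))) (loop_dict : List (String × List String)) (out : List (String × String)) : Decidable (Spec_patch_and_repair aln_seqs loop_dict out) := by unfold Spec_patch_and_repair; infer_instance

-- ===== CLAIM (what is proved, stated in full; the proofs are below) =====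
def Claim_equal_patch_and_repair : Prop := ∀ (aln_seqs : List (String × List (String × String))) (loop_dict : List (String × List String)), Dom_patch_and_repair aln_seqs loop_dict → Pre_patch_and_repair aln_seqs loop_dict → Spec_patch_and_repair aln_seqs loop_dict (patch_and_repair aln_seqs loop_dict)

-- ===== LEMMAS AND PROOFS =====

-- the comparator sorted2 … Prod.fst Prod.snd uses (Python's tuple `<`)
def pvBef (a b : String × String) : Bool :=
  decide (a.1 < b.1) || (!(decide (b.1 < a.1)) && decide (a.2 < b.2))

theorem pvSorted2_eq (xs : List (String × String)) :
    PySem.List.sorted2 xs Prod.fst Prod.snd =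
    xs.foldl (fun acc x => PySem.List.insertBy pvBef x acc) [] := rfl

theorem pvBef_false_iff (a b : String × String) :
    pvBef a b = false ↔ (b.1 ≤ a.1 ∧ (a.1 ≤ b.1 → b.2 ≤ a.2)) := by
  simp [pvBef, not_lt]

theorem pvBef_asym {a b : String × String} (h : pvBef a b = true) : pvBef b a = false := by
  rw [pvBef_false_iff]
  simp only [pvBef, Bool.or_eq_true, Bool.and_eq_true, Bool.not_eq_true', decide_eq_true_iff,
    decide_eq_false_iff_not, not_lt] at h
  rcases h with h | ⟨h1, h2⟩
  · exact ⟨h.le, fun hba => absurd h (not_lt.mpr hba)⟩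
  · exact ⟨h1, fun _ => h2.le⟩

theorem pvBef_trans {a b c : String × String} (h1 : pvBef b a = false) (h2 : pvBef c b = false) :
    pvBef c a = false := by
  rw [pvBef_false_iff] at h1 h2 ⊢
  refine ⟨h1.1.trans h2.1, fun hca => ?_⟩
  have hba : b.1 ≤ a.1 := h2.1.trans hca
  have hcb : c.1 ≤ b.1 := hca.trans h1.1
  exact (h1.2 hba).trans (h2.2 hcb)

theorem pvPairwise_insertBy (x : String × String) (ys : List (String × String))
    (h : ys.Pairwise (fun a b => pvBef b a = false)) :
    (PySem.List.insertBy pvBef x ys).Pairwise (fun a b => pvBef b a = false) := by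
  induction ys with
  | nil => simp [PySem.List.insertBy]
  | cons y ys ih =>
    rw [List.pairwise_cons] at h
    obtain ⟨hy, hys⟩ := h
    by_cases hb : pvBef x y = true
    · rw [show PySem.List.insertBy pvBef x (y :: ys) = x :: y :: ys from by
        simp [PySem.List.insertBy, hb]]
      refine List.pairwise_cons.mpr ⟨?_, List.pairwise_cons.mpr ⟨hy, hys⟩⟩
      intro z hz
      rcases List.mem_cons.mp hz with rfl | hz
      · exact pvBef_asym hb
      · exact pvBef_trans (pvBef_asym hb) (hy z hz)
    · rw [show PySem.List.insertBy pvBef x (y :: ys) = y :: PySem.List.insertBy pvBef x ys from by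
        simp [PySem.List.insertBy, hb]]
      refine List.pairwise_cons.mpr ⟨?_, ih hys⟩
      intro z hz
      rcases (PySem.List.mem_insertBy pvBef x z ys).1 hz with rfl | hz
      · simpa using hb
      · exact hy z hz

theorem pvPairwise_foldl_insertBy (xs : List (String × String)) :
    ∀ (acc : List (String × String)), acc.Pairwise (fun a b => pvBef b a = false) →
    (xs.foldl (fun acc x => PySem.List.insertBy pvBef x acc) acc).Pairwise
      (fun a b => pvBef b a = false) := by
  induction xs with
  | nil => intro acc h; simpa using h
  | cons x xs ih =>
    intro acc h
    exact ih _ (pvPairwise_insertBy x acc h)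

theorem pvPairwise_sorted2 (xs : List (String × String)) :
    (PySem.List.sorted2 xs Prod.fst Prod.snd).Pairwise (fun a b => pvBef b a = false) := by
  rw [pvSorted2_eq]
  exact pvPairwise_foldl_insertBy xs [] (by simp)

theorem pvEq_of_perm_of_fst_lt {l₁ l₂ : List (String × String)} (hp : l₁.Perm l₂)
    (h₁ : l₁.Pairwise (fun a b => a.1 < b.1)) (h₂ : l₂.Pairwise (fun a b => a.1 < b.1)) :
    l₁ = l₂ := by
  induction l₁ generalizing l₂ with
  | nil => exact (hp.nil_eq).symm ▸ rfl
  | cons a t ih =>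
    cases l₂ with
    | nil => exact absurd hp.symm (by simp)
    | cons b u =>
      rw [List.pairwise_cons] at h₁ h₂
      have hab : a = b := by
        by_contra hne
        have ha : a ∈ b :: u := hp.mem_iff.mp (by simp)
        have hb : b ∈ a :: t := hp.mem_iff.mpr (by simp)
        rcases List.mem_cons.mp ha with rfl | ha
        · exact hne rfl
        rcases List.mem_cons.mp hb with rfl | hb
        · exact hne rfl
        · exact absurd ((h₁.1 b hb).trans (h₂.1 a ha)) (lt_irrefl _)
      subst hab
      rw [ih (hp.cons_inv) h₁.2 h₂.2]

-- the flattened stream of grouping events: (s_idx, (region, sequence))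
def pvL (aln_seqs : List (String × List (String × String))) : List (String × (String × String)) :=
  aln_seqs.flatMap (fun p => p.2.map (fun q => (q.1, (p.1, q.2))))

-- the per-sample group in traversal order, as a filterMap over the regions
def pvGrp (aln_seqs : List (String × List (String × String))) (s : String) : List (String × String) :=
  aln_seqs.filterMap (fun p => ((PySem.Dict.mk p.2).get? s).map (fun v => (p.1, v)))

-- the per-sample group in global sorted-region order
def pvT (aln_seqs : List (String × List (String × String))) (s : String) : List (String × String) :=
  (PySem.List.sorted (aln_seqs.map Prod.fst) (fun x => x)).filterMap (fun r =>
    ((PySem.Dict.mk aln_seqs).get? r).bind (fun al => ((PySem.Dict.mk al).get? s).map (fun v => (r, v))))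

theorem pvMaster_eq (aln_seqs : List (String × List (String × String))) (d : PySem.Dict String (List (String × String))) :
    aln_seqs.foldl
      (fun d p => p.2.foldl (fun d q => d.modify q.1 [] (fun xs => xs ++ [(p.1, q.2)])) d) d =
    (pvL aln_seqs).foldl (fun d x => d.modify x.1 [] (fun xs => xs ++ [x.2])) d := by
  induction aln_seqs generalizing d with
  | nil => rfl
  | cons p ps ih =>
    simp only [pvL, List.flatMap_cons, List.foldl_append, List.foldl_cons, List.foldl_map]
    rw [ih]
    rfl

theorem pvFilter_map_nodup (p1 s : String) (l : List (String × String))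
    (h : (l.map Prod.fst).Nodup) :
    ((l.map (fun q => (q.1, (p1, q.2)))).filter (fun x => x.1 == s)).map Prod.snd =
      (((PySem.Dict.mk l).get? s).map (fun v => (p1, v))).toList := by
  induction l with
  | nil => simp [PySem.Dict.get?]
  | cons q t ih =>
    simp only [List.map_cons, List.nodup_cons] at h
    rw [PySem.Dict.get?_mk_cons]
    by_cases hk : q.1 = s
    · subst hk
      have htail : ((t.map (fun q' => (q'.1, (p1, q'.2)))).filter (fun x => x.1 == q.1)) = [] := by
        rw [List.filter_eq_nil_iff]
        intro x hx
        simp only [List.mem_map] at hx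
        obtain ⟨q', hq', rfl⟩ := hx
        simp only [beq_iff_eq]
        intro hqs
        exact h.1 (hqs ▸ List.mem_map_of_mem (f := Prod.fst) hq')
      simp [htail]
    · simp only [List.map_cons, List.filter_cons]
      rw [if_neg (by simpa using hk), if_neg (by simpa using hk)]
      exact ih h.2

theorem pvGroup_eq (aln_seqs : List (String × List (String × String))) (s : String)
    (h : ∀ p ∈ aln_seqs, (p.2.map Prod.fst).Nodup) :
    ((pvL aln_seqs).filter (fun x => x.1 == s)).map Prod.snd = pvGrp aln_seqs s := by
  induction aln_seqs with
  | nil => rfl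
  | cons p ps ih =>
    simp only [pvL, List.flatMap_cons, List.filter_append, List.map_append]
    rw [pvFilter_map_nodup p.1 s p.2 (h p (by simp))]
    rw [show ((ps.flatMap (fun p => p.2.map (fun q => (q.1, (p.1, q.2))))).filter
        (fun x => x.1 == s)).map Prod.snd = pvGrp ps s from
      ih (fun p hp => h p (List.mem_cons_of_mem _ hp))]
    simp only [pvGrp, List.filterMap_cons]
    cases hq : (PySem.Dict.mk p.2).get? s <;> simp

theorem pvT_perm (aln_seqs : List (String × List (String × String))) (s : String)
    (hout : (aln_seqs.map Prod.fst).Nodup) :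
    (pvT aln_seqs s).Perm (pvGrp aln_seqs s) := by
  unfold pvT
  have hperm := (PySem.List.sorted_perm (aln_seqs.map Prod.fst) (fun x => x) false).filterMap
    (fun r => ((PySem.Dict.mk aln_seqs).get? r).bind
      (fun al => ((PySem.Dict.mk al).get? s).map (fun v => (r, v))))
  refine hperm.trans ?_
  rw [List.filterMap_map]
  rw [show (aln_seqs.filterMap ((fun r => ((PySem.Dict.mk aln_seqs).get? r).bind
      (fun al => ((PySem.Dict.mk al).get? s).map (fun v => (r, v)))) ∘ Prod.fst)) =
      pvGrp aln_seqs s from ?_]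
  unfold pvGrp
  apply List.filterMap_congr
  intro p hp
  have hg : (PySem.Dict.mk aln_seqs).get? p.1 = some p.2 :=
    PySem.Dict.get?_of_mem_items (PySem.Dict.mk aln_seqs) (by simpa using hp) (by simpa using hout)
  simp [Function.comp, hg]

theorem pvOrder_pairwise (aln_seqs : List (String × List (String × String)))
    (hout : (aln_seqs.map Prod.fst).Nodup) :
    (PySem.List.sorted (aln_seqs.map Prod.fst) (fun x => x)).Pairwise (· < ·) := by
  have hle := PySem.List.sorted_pairwise (aln_seqs.map Prod.fst) (fun x => x)
  have hnd : (PySem.List.sorted (aln_seqs.map Prod.fst) (fun x => x)).Nodup :=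
    ((PySem.List.sorted_perm (aln_seqs.map Prod.fst) (fun x => x) false).nodup_iff).mpr hout
  exact (hle.and hnd).imp (fun h => lt_of_le_of_ne h.1 h.2)

theorem pvT_pairwise (aln_seqs : List (String × List (String × String))) (s : String)
    (hout : (aln_seqs.map Prod.fst).Nodup) :
    (pvT aln_seqs s).Pairwise (fun a b => a.1 < b.1) := by
  unfold pvT
  rw [List.pairwise_filterMap]
  refine (pvOrder_pairwise aln_seqs hout).imp ?_
  intro r r' hlt b hb b' hb'
  have h1 : b.1 = r := by
    cases h : (PySem.Dict.mk aln_seqs).get? r with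
    | none => rw [h] at hb; exact absurd hb (by simp)
    | some al =>
      rw [h] at hb
      have hb1 : ((PySem.Dict.mk al).get? s).map (fun v => (r, v)) = some b := hb
      cases h2 : (PySem.Dict.mk al).get? s with
      | none => rw [h2] at hb1; exact absurd hb1 (by simp)
      | some v =>
        rw [h2] at hb1
        have hb2 : (r, v) = b := Option.some.inj (show some (r, v) = some b from hb1)
        rw [← hb2]
  have h2 : b'.1 = r' := by
    cases h : (PySem.Dict.mk aln_seqs).get? r' with
    | none => rw [h] at hb'; exact absurd hb' (by simp)
    | some al =>
      rw [h] at hb'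
      have hb1 : ((PySem.Dict.mk al).get? s).map (fun v => (r', v)) = some b' := hb'
      cases h2 : (PySem.Dict.mk al).get? s with
      | none => rw [h2] at hb1; exact absurd hb1 (by simp)
      | some v =>
        rw [h2] at hb1
        have hb2 : (r', v) = b' := Option.some.inj (show some (r', v) = some b' from hb1)
        rw [← hb2]
  rw [h1, h2]
  exact hlt

theorem pvSorted2_grp (aln_seqs : List (String × List (String × String))) (s : String)
    (hout : (aln_seqs.map Prod.fst).Nodup) :
    PySem.List.sorted2 (pvGrp aln_seqs s) Prod.fst Prod.snd = pvT aln_seqs s := by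
  have hperm : (PySem.List.sorted2 (pvGrp aln_seqs s) Prod.fst Prod.snd).Perm (pvT aln_seqs s) :=
    (PySem.List.sorted2_perm (pvGrp aln_seqs s) Prod.fst Prod.snd false).trans
      (pvT_perm aln_seqs s hout).symm
  have hTpw := pvT_pairwise aln_seqs s hout
  have hndT : ((pvT aln_seqs s).map Prod.fst).Nodup :=
    List.pairwise_map.mpr (hTpw.imp fun h => ne_of_lt h)
  have hndS : ((PySem.List.sorted2 (pvGrp aln_seqs s) Prod.fst Prod.snd).map Prod.fst).Nodup :=
    ((hperm.map Prod.fst).nodup_iff).mpr hndT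
  have hSne : (PySem.List.sorted2 (pvGrp aln_seqs s) Prod.fst Prod.snd).Pairwise
      (fun a b => a.1 ≠ b.1) := List.pairwise_map.mp hndS
  have hSle := pvPairwise_sorted2 (pvGrp aln_seqs s)
  have hSpw : (PySem.List.sorted2 (pvGrp aln_seqs s) Prod.fst Prod.snd).Pairwise
      (fun a b => a.1 < b.1) :=
    (hSle.and hSne).imp (fun h => lt_of_le_of_ne ((pvBef_false_iff _ _).mp h.1).1 h.2)
  exact pvEq_of_perm_of_fst_lt hperm hSpw hTpw

theorem pvInterleave (loop : List String) :
    ∀ (item : List String) (n : Nat) (acc : List String),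
    (item.foldl (fun st ls =>
        ((st.1 ++ [ls]) ++ (if st.2 < loop.length then [loop.getD st.2 ""] else []), st.2 + 1))
      (acc, n)).1
    = acc ++ ((item.zip (loop.drop n)).flatMap (fun p => [p.1, p.2]) ++ item.drop (loop.length - n)) := by
  intro item
  induction item with
  | nil => intro n acc; simp
  | cons x t ih =>
    intro n acc
    rw [List.foldl_cons]
    rw [ih]
    by_cases hn : n < loop.length
    · rw [if_pos hn]
      rw [List.getD_eq_getElem loop "" hn]
      rw [List.drop_eq_getElem_cons hn]
      have hlen : loop.length - n = (loop.length - (n + 1)) + 1 := by omega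
      rw [hlen, List.drop_succ_cons, List.zip_cons_cons, List.flatMap_cons]
      simp
    · rw [if_neg hn]
      have h1 : loop.drop n = [] := List.drop_eq_nil_of_le (by omega)
      have h2 : loop.length - n = 0 := by omega
      have h3 : loop.length - (n + 1) = 0 := by omega
      have h4 : List.drop (n + 1) loop = [] := List.drop_eq_nil_of_le (by omega)
      rw [h1, h2, h3, h4]
      simp

theorem pvConserved_eq (aln_seqs : List (String × List (String × String))) (s : String) :
    (PySem.List.sorted (aln_seqs.map Prod.fst) (fun x => x)).filterMap (fun r =>
      ((PySem.Dict.mk aln_seqs).get? r).bind (fun al => (PySem.Dict.mk al).get? s)) =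
    (pvT aln_seqs s).map Prod.snd := by
  unfold pvT
  rw [List.map_filterMap]
  apply List.filterMap_congr
  intro r _
  cases h : (PySem.Dict.mk aln_seqs).get? r with
  | none => simp
  | some al =>
    cases h2 : (PySem.Dict.mk al).get? s with
    | none => simp [h2]
    | some v => simp [h2]

-- ===== VERDICT (by name: the statement is the Claim_ definition above) =====
theorem patch_and_repair_spec : Claim_equal_patch_and_repair := by
  intro aln loop _ hpre
  obtain ⟨hout, hin, -⟩ := hpre
  unfold Spec_patch_and_repair patch_and_repair patch_and_repair_alt
  dsimp only
  rw [pvMaster_eq aln PySem.Dict.empty]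
  set D := (pvL aln).foldl (fun d x => d.modify x.1 [] (fun xs => xs ++ [x.2]))
    PySem.Dict.empty with hD
  have hkeys : D.keys = PySem.Set.ofList (aln.flatMap fun p => p.2.map Prod.fst) := by
    rw [hD, PySem.Dict.keys_foldl_modify_key]
    have h0 : (PySem.Dict.empty : PySem.Dict String (List (String × String))).keys =
      ([] : List String) := rfl
    rw [h0]
    have h1 : ((pvL aln).map (fun x => x.1)) = aln.flatMap (fun p => p.2.map Prod.fst) := by
      simp [pvL, List.map_flatMap, List.map_map, Function.comp_def]
    rw [h1]
    rfl
  have hnodk : D.keys.Nodup := by rw [hkeys]; exact PySem.Set.nodup_ofList _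
  have hitems : D.items = D.keys.map (fun k => (k, D.getD k [])) :=
    PySem.Dict.items_eq_map_keys D hnodk []
  rw [PySem.List.foldl_append_singleton_eq_map]
  rw [hitems, List.map_map, ← hkeys]
  apply List.map_congr_left
  intro s _
  have hg : D.getD s [] = pvGrp aln s := by
    rw [hD, PySem.Dict.getD_foldl_modify_append]
    have h0 : (PySem.Dict.empty : PySem.Dict String (List (String × String))).getD s [] = [] := rfl
    rw [h0, List.nil_append]
    exact pvGroup_eq aln s hin
  simp only [Function.comp]
  rw [hg, pvSorted2_grp aln s hout]
  rw [pvConserved_eq aln s]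
  rw [← List.foldl_map (f := Prod.snd)
    (g := fun st ls => ((st.1 ++ [ls]) ++
      (if st.2 < ((PySem.Dict.mk loop).getD s []).length
        then [((PySem.Dict.mk loop).getD s []).getD st.2 ""] else []), st.2 + 1))]
  rw [pvInterleave ((PySem.Dict.mk loop).getD s []) ((pvT aln s).map Prod.snd) 0 []]
  simp
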